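-- pv_equiv track=rewrite | github.com/DopleZZ/Pulsarify | dist/Pulsarify.app/Contents/Resources/src/text_processor.py | assign_boldness
-- ===== SOURCE A (Python) =====
-- STEP = 3
--
-- def assign_boldness(text, z_values):
--     result = []
--     for i, char in enumerate(text):
--         z_index = i // STEP
--         if z_index < len(z_values):
--             z = z_values[z_index]
--         else:
--             z = 0
--         result.append((char, z))
--     return result
-- ===== SOURCE B (Python) =====
-- STEP = 3
--
-- def assign_boldness(text, z_values):
--     expanded = [z for z in z_values for _ in range(STEP)]
--     expanded += [0] * max(0, len(text) - len(expanded))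
--     return [(c, z) for c, z in zip(text, expanded)]
-- ===== Notes on version B (the rewrite author's own statement) =====
-- stated objective: simpler
-- what changed: Replaces the per-character i//STEP index-division loop by a build-then-zip decomposition: expand z_values into a per-character list (each value repeated STEP times, padded with zeros to the text length) and zip it with the text.
import Mathlib
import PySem

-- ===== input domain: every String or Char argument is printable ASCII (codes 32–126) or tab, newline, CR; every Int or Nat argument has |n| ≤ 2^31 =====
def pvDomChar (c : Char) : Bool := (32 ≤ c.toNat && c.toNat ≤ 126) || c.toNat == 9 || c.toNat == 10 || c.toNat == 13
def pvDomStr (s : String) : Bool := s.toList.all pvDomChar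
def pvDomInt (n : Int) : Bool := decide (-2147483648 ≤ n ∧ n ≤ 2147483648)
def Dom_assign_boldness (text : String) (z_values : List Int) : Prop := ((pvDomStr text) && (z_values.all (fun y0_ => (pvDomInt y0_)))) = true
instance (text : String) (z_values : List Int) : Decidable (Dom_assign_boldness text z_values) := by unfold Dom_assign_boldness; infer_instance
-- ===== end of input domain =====

-- B replaces the per-character i//STEP scan by a build-then-zip decomposition (simpler); A = B everywhere.


-- ===== PORT A =====
def assign_boldness (text : String) (z_values : List Int) : List (String × Int) :=
  (PySem.List.enumerate text.toList 0).foldl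
    (fun result ic =>
      let z_index : Int := PySem.Int.floordiv ic.1 3
      let z : Int :=
        if z_index < (z_values.length : Int) then
          (PySem.List.pyGet? z_values z_index).getD 0
        else 0
      result ++ [(String.mk [ic.2], z)]) []

-- ===== PORT B =====
def assign_boldness_alt (text : String) (z_values : List Int) : List (String × Int) :=
  let expanded := z_values.flatMap (fun z => List.replicate 3 z)
  let expanded2 := expanded ++ List.replicate (text.toList.length - expanded.length) 0
  (text.toList.map (fun c => String.mk [c])).zip expanded2

-- ===== PRECONDITION & SPEC =====
def Spec_assign_boldness (text : String) (z_values : List Int) (out : List (String × Int)) : Prop := out = assign_boldness_alt text z_values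
instance (text : String) (z_values : List Int) (out : List (String × Int)) : Decidable (Spec_assign_boldness text z_values out) := by unfold Spec_assign_boldness; infer_instance

-- ===== CLAIM (what is proved, stated in full; the proofs are below) =====
def Claim_equal_assign_boldness : Prop := ∀ (text : String) (z_values : List Int), Dom_assign_boldness text z_values → Spec_assign_boldness text z_values (assign_boldness text z_values)

-- ===== LEMMAS AND PROOFS =====

theorem pv_foldl_app {α β : Type} (f : α → β) (l : List α) (init : List β) :
    l.foldl (fun r x => r ++ [f x]) init = init ++ l.map f := by
  induction l generalizing init with
  | nil => simp
  | cons a t ih => simp [List.foldl, ih]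

theorem pv_flatMap_rep_getElem? (l : List Int) (i : Nat) (h : i < 3 * l.length) :
    (l.flatMap (fun z => List.replicate 3 z))[i]? = l[i / 3]? := by
  induction l generalizing i with
  | nil => simp at h
  | cons a t ih =>
    simp only [List.flatMap_cons]
    by_cases hi : i < 3
    · have h3 : i / 3 = 0 := by omega
      rw [List.getElem?_append_left (by simp [hi])]
      interval_cases i <;> simp
    · have h3 : i / 3 = (i - 3) / 3 + 1 := by omega
      rw [List.getElem?_append_right (by simp; omega)]
      simp only [List.length_replicate, h3]
      have := ih (i - 3) (by simp at h ⊢; omega)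
      simpa using this
  
theorem pv_main (text : String) (z_values : List Int) :
    assign_boldness text z_values = assign_boldness_alt text z_values := by
  unfold assign_boldness assign_boldness_alt
  rw [pv_foldl_app]
  simp only [List.nil_append]
  set s := text.toList with hs
  set L := z_values.length with hL
  set expanded := z_values.flatMap (fun z => List.replicate 3 z) with he
  have hexp : expanded.length = 3 * L := by simp [he, hL, List.length_flatMap, Nat.mul_comm]
  apply List.ext_getElem?
  intro i
  by_cases hi : i < s.length
  · rw [List.getElem?_map, PySem.List.getElem?_enumerate,
        List.getElem?_eq_getElem hi]
    have hzipLen : i < ((s.map (fun c => String.mk [c])).zip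
        (expanded ++ List.replicate (s.length - expanded.length) 0)).length := by
      simp only [List.length_zip, List.length_map, List.length_append, List.length_replicate]
      omega
    rw [List.getElem?_eq_getElem hzipLen, List.getElem_zip, List.getElem_map]
    simp only [Option.map_some, Option.some.injEq]
    rw [Prod.mk.injEq]
    refine ⟨rfl, ?_⟩
    -- z component
    have hfd : PySem.Int.floordiv ((0 : Int) + (i : Int)) 3 = ((i / 3 : Nat) : Int) := by
      rw [zero_add]
      exact_mod_cast PySem.Int.floordiv_natCast i 3
    simp only [hfd]
    by_cases hlt : i < 3 * L
    · have hdl : i / 3 < L := by omega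
      rw [if_pos (by exact_mod_cast hdl)]
      rw [List.getElem_append_left (by omega)]
      have hq : expanded[i]? = z_values[i / 3]? := pv_flatMap_rep_getElem? z_values i (hL ▸ hlt)
      have hv : expanded[i]'(by omega) = z_values[i / 3]'hdl := by
        have := hq
        rw [List.getElem?_eq_getElem (by omega), List.getElem?_eq_getElem hdl] at this
        exact Option.some.inj this
      rw [PySem.List.pyGet?_natCast, List.getElem?_eq_getElem hdl]
      simp [hv]
    · have hdl : ¬ i / 3 < L := by omega
      rw [if_neg (by exact_mod_cast hdl)]
      rw [List.getElem_append_right (by omega)]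
      simp
  · rw [List.getElem?_eq_none, List.getElem?_eq_none]
    · simp only [List.length_zip, List.length_map, List.length_append, List.length_replicate]
      omega
    · simp [PySem.List.length_enumerate]; omega

-- ===== VERDICT (by name: the statement is the Claim_ definition above) =====
theorem assign_boldness_spec : Claim_equal_assign_boldness := by
  intro text z_values _
  exact pv_main text z_values
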